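-- pv_equiv track=rewrite | github.com/ATMPace/PACE2019 | test_instance_creator.py | create_instance
-- ===== SOURCE A (Python) =====
-- def edge_vector_length(number_nodes):
--     return int(number_nodes * (number_nodes - 1) / 2)
--
-- def create_instance(number_of_nodes, edge_vector):
--     if pow(2, edge_vector_length(number_of_nodes)) - 1 < edge_vector:
--         raise ValueError("edge vector too long for number of nodes in graph")
--     result = []
--     edge_vector_rest = edge_vector
--     for i in range(1, number_of_nodes + 1):
--         for j in range(i + 1, number_of_nodes + 1):
--             if edge_vector_rest % 2 == 1:
--                 result.append((i,j))
--             edge_vector_rest = edge_vector_rest >> 1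
--     return result
-- ===== SOURCE B (Python) =====
-- def create_instance(number_of_nodes, edge_vector):
--     num_edges = number_of_nodes * (number_of_nodes - 1) // 2
--     if edge_vector > (1 << num_edges) - 1:
--         raise ValueError("edge vector too long for number of nodes in graph")
--     w = edge_vector & ((1 << num_edges) - 1)
--     result = []
--     for i in range(1, number_of_nodes):
--         if not w:
--             break
--         m = number_of_nodes - i
--         chunk = w & ((1 << m) - 1)
--         w >>= m
--         j = i
--         while chunk:
--             step = (chunk & -chunk).bit_length()
--             j += step
--             result.append((i, j))
--             chunk >>= step
--     return result
-- ===== Notes on version B (the rewrite author's own statement) =====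
-- stated objective: faster
-- what changed: B masks the edge vector to its n(n-1)/2 relevant bits once, then walks rows jumping directly from one set bit to the next via (chunk & -chunk).bit_length() and stops as soon as no bits remain, instead of A's nested loops testing every bit position with %2 and >>1.
import Mathlib
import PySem

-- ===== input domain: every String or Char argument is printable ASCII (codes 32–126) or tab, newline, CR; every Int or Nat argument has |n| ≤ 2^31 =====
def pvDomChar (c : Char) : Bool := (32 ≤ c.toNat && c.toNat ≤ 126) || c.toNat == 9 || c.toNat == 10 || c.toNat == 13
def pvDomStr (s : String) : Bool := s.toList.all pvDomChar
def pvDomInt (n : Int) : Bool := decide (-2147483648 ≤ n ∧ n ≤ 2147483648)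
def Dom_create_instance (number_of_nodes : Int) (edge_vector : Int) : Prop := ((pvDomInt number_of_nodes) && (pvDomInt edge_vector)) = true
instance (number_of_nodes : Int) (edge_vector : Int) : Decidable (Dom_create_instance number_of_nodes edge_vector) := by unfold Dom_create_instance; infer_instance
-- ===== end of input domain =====

-- B masks the edge vector to its n(n-1)/2 relevant bits once and then walks rows,
-- jumping from one set bit to the next and stopping when no bits remain, instead of
-- A's nested loops testing every bit position; equivalence is proved on Pre_ (the
-- inputs where the Python A returns instead of raising ValueError).

-- ===== PORT A =====
-- int(number_nodes * (number_nodes - 1) / 2): n*(n-1) is even and nonnegative, so the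
-- division is exact; the float rounding of CPython's '/' can only differ beyond 2^53,
-- where (for |edge_vector| ≤ 2^31, as in Dom) it cannot change the one comparison
-- this value is used in.
def edge_vector_length (number_nodes : Int) : Int :=
  number_nodes * (number_nodes - 1) / 2

def create_instance (number_of_nodes : Int) (edge_vector : Int) : List (List Int) :=
  if 2 ^ (edge_vector_length number_of_nodes).toNat - 1 < edge_vector then
    []  -- Python: raise ValueError("edge vector too long ..."); excluded by Pre_
  else
    ((PySem.List.pyRange 1 (number_of_nodes + 1) 1).foldl (fun st i =>
      (PySem.List.pyRange (i + 1) (number_of_nodes + 1) 1).foldl (fun st j =>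
        ((if PySem.Int.mod st.2 2 = 1 then st.1 ++ [[i, j]] else st.1),
          st.2 >>> (1 : Nat)))
        st)
      ([], edge_vector)).1

-- ===== PORT B =====
-- 'while chunk:' of Source B, with fuel chunk.toNat — enough since the chunk strictly
-- decreases each step (Python would loop forever on a negative chunk, unreachable:
-- every chunk is a nonnegative masked value, on which the fuel never runs out)
def rowLoopF (i : Int) : Nat → Int → Int → List (List Int)
  | 0, _, _ => []
  | fuel + 1, j, c =>
    if 0 < c then
      let step := PySem.Int.bitLength (PySem.Int.band c (-c))
      [i, j + (step : Int)] :: rowLoopF i fuel (j + (step : Int)) (c >>> step)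
    else []

def rowLoop (i j c : Int) : List (List Int) := rowLoopF i c.toNat j c

-- 'for i in range(1, number_of_nodes): if not w: break …' of Source B
def bLoop (n : Int) : List Int → List (List Int) × Int → List (List Int)
  | [], st => st.1
  | i :: rest, st =>
    if st.2 = 0 then st.1
    else
      bLoop n rest
        (st.1 ++ rowLoop i i
            (PySem.Int.band st.2 (((1 : Int) <<< (n - i).toNat) - 1)),
          st.2 >>> (n - i).toNat)

def create_instance_alt (number_of_nodes : Int) (edge_vector : Int) : List (List Int) :=
  let num_edges := PySem.Int.floordiv (number_of_nodes * (number_of_nodes - 1)) 2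
  if ((1 : Int) <<< num_edges.toNat) - 1 < edge_vector then
    []  -- Python: raise ValueError("edge vector too long ..."); excluded by Pre_
  else
    bLoop number_of_nodes (PySem.List.pyRange 1 number_of_nodes 1)
      ([], PySem.Int.band edge_vector (((1 : Int) <<< num_edges.toNat) - 1))

-- ===== PRECONDITION & SPEC =====
-- Pre_ is exactly the set of inputs on which A returns normally (A raises ValueError
-- outside it); stated via bit_length so it is cheap to decide.
def Pre_create_instance (number_of_nodes : Int) (edge_vector : Int) : Prop :=
  edge_vector ≤ 0 ∨
    (PySem.Int.bitLength edge_vector : Int) ≤ edge_vector_length number_of_nodes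

instance (number_of_nodes : Int) (edge_vector : Int) :
    Decidable (Pre_create_instance number_of_nodes edge_vector) := by
  unfold Pre_create_instance; infer_instance

def pvWitness_create_instance : Int × Int := (3, 5)

def Spec_create_instance (number_of_nodes : Int) (edge_vector : Int)
    (out : List (List Int)) : Prop := out = create_instance_alt number_of_nodes edge_vector

instance (number_of_nodes : Int) (edge_vector : Int) (out : List (List Int)) :
    Decidable (Spec_create_instance number_of_nodes edge_vector out) := by
  unfold Spec_create_instance; infer_instance

-- ===== CLAIM (what is proved, stated in full; the proofs are below) =====
def Claim_equal_create_instance : Prop := ∀ (number_of_nodes : Int) (edge_vector : Int), Dom_create_instance number_of_nodes edge_vector → Pre_create_instance number_of_nodes edge_vector → Spec_create_instance number_of_nodes edge_vector (create_instance number_of_nodes edge_vector)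

-- ===== LEMMAS AND PROOFS =====

theorem pv_band_neg_self (w : Int) (h : 0 < w) :
    PySem.Int.band w (-w) = ((w.toNat - (w.toNat &&& (w.toNat - 1)) : Nat) : Int) := by
  unfold PySem.Int.band
  rw [if_pos (by omega : (0:Int) ≤ w), if_neg (by omega : ¬ (0:Int) ≤ -w)]
  have h1 : (-(-w) - 1) = w - 1 := by ring
  rw [h1]
  have h2 : (w - 1).toNat = w.toNat - 1 := by omega
  rw [h2]

theorem pv_band_neg_self_pos (w : Int) (h : 0 < w) : 0 < PySem.Int.band w (-w) := by
  rw [pv_band_neg_self w h]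
  have h1 : w.toNat &&& (w.toNat - 1) ≤ w.toNat - 1 := Nat.and_le_right
  omega

theorem pv_bitLength_pos (x : Int) (hx : x ≠ 0) : 0 < PySem.Int.bitLength x := by
  by_contra hb
  have h2 := PySem.Int.lt_two_pow_bitLength x
  simp only [Nat.not_lt, Nat.le_zero] at hb
  rw [hb] at h2
  simp at h2
  omega

-- one loop step strictly shrinks the chunk
theorem pv_shift_lt (c : Int) (h : 0 < c) :
    (c >>> PySem.Int.bitLength (PySem.Int.band c (-c))).toNat < c.toNat := by
  have hbp := pv_band_neg_self_pos c h
  have ht : 0 < PySem.Int.bitLength (PySem.Int.band c (-c)) :=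
    pv_bitLength_pos _ (by omega)
  have e : c >>> PySem.Int.bitLength (PySem.Int.band c (-c))
      = ((c.toNat >>> PySem.Int.bitLength (PySem.Int.band c (-c)) : Nat) : Int) := by
    rw [Int.natCast_shiftRight, Int.toNat_of_nonneg h.le]
  rw [e, Int.toNat_natCast, Nat.shiftRight_eq_div_pow]
  exact Nat.div_lt_self (by omega) (Nat.one_lt_two_pow_iff.mpr (by omega))

theorem pv_shift_nonneg (c : Int) (h : 0 < c) :
    0 ≤ c >>> PySem.Int.bitLength (PySem.Int.band c (-c)) := by
  have e : c >>> PySem.Int.bitLength (PySem.Int.band c (-c))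
      = ((c.toNat >>> PySem.Int.bitLength (PySem.Int.band c (-c)) : Nat) : Int) := by
    rw [Int.natCast_shiftRight, Int.toNat_of_nonneg h.le]
  rw [e]
  positivity

-- any fuel at least c.toNat computes the same list
theorem rowLoopF_congr (i : Int) : ∀ (f1 f2 : Nat) (j c : Int), 0 ≤ c →
    c.toNat ≤ f1 → c.toNat ≤ f2 → rowLoopF i f1 j c = rowLoopF i f2 j c := by
  intro f1
  induction f1 with
  | zero =>
    intro f2 j c hc h1 h2
    have hc0 : c = 0 := by omega
    subst hc0
    cases f2 <;> simp [rowLoopF]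
  | succ f1 IH =>
    intro f2 j c hc h1 h2
    cases f2 with
    | zero =>
      have hc0 : c = 0 := by omega
      subst hc0
      simp [rowLoopF]
    | succ f2 =>
      show rowLoopF i (f1 + 1) j c = rowLoopF i (f2 + 1) j c
      rw [rowLoopF, rowLoopF]
      by_cases hcp : 0 < c
      · rw [if_pos hcp, if_pos hcp]
        have hlt := pv_shift_lt c hcp
        have hnn := pv_shift_nonneg c hcp
        simp only []
        rw [IH f2 _ _ hnn (by omega) (by omega)]
      · rw [if_neg hcp, if_neg hcp]

theorem rowLoop_pos (i j c : Int) (h : 0 < c) :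
    rowLoop i j c =
      [i, j + (PySem.Int.bitLength (PySem.Int.band c (-c)) : Int)] ::
        rowLoop i (j + (PySem.Int.bitLength (PySem.Int.band c (-c)) : Int))
          (c >>> PySem.Int.bitLength (PySem.Int.band c (-c))) := by
  unfold rowLoop
  obtain ⟨k, hk⟩ : ∃ k, c.toNat = k + 1 := ⟨c.toNat - 1, by omega⟩
  rw [hk, rowLoopF, if_pos h]
  have hlt := pv_shift_lt c h
  have hnn := pv_shift_nonneg c h
  simp only []
  rw [rowLoopF_congr i k _ _ _ hnn (by omega) le_rfl]

theorem rowLoop_nonpos (i j c : Int) (h : ¬ 0 < c) : rowLoop i j c = [] := by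
  unfold rowLoop
  rw [show c.toNat = 0 by omega]
  rfl

-- bit positions of both programs, as one common specification
def rowSpec (i j : Int) (a : Nat) : List (List Int) :=
  if h : a = 0 then [] else
    (if a % 2 = 1 then [[i, j]] else []) ++ rowSpec i (j + 1) (a / 2)
termination_by a
decreasing_by exact Nat.div_lt_self (Nat.pos_of_ne_zero h) one_lt_two

-- the value A's inner loop appends for one row, reading bits by mod/shift
def rowA (i j rest : Int) : Nat → List (List Int)
  | 0 => []
  | m + 1 =>
    (if PySem.Int.mod rest 2 = 1 then [[i, j]] else []) ++
      rowA i (j + 1) (rest >>> (1 : Nat)) m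

theorem lowb_odd (c : Nat) : (2 * c + 1) &&& (2 * c) = 2 * c := by
  apply Nat.eq_of_testBit_eq
  intro k
  rw [Nat.testBit_and]
  cases k with
  | zero =>
    have h0 : (2 * c) % 2 = 0 := by omega
    simp [Nat.testBit_zero, h0]
  | succ k =>
    simp only [Nat.testBit_add_one]
    have h1 : (2 * c + 1) / 2 = c := by omega
    have h2 : (2 * c) / 2 = c := by omega
    rw [h1, h2, Bool.and_self]

theorem lowb_even (c : Nat) : (2 * c) &&& (2 * c - 1) = 2 * (c &&& (c - 1)) := by
  rcases Nat.eq_zero_or_pos c with rfl | hc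
  · simp
  apply Nat.eq_of_testBit_eq
  intro k
  rw [Nat.testBit_and]
  cases k with
  | zero =>
    have h0 : (2 * c) % 2 = 0 := by omega
    have h1 : (2 * (c &&& (c - 1))) % 2 = 0 := by omega
    simp [Nat.testBit_zero, h0, h1]
  | succ k =>
    simp only [Nat.testBit_add_one]
    have h1 : (2 * c) / 2 = c := by omega
    have h2 : (2 * c - 1) / 2 = c - 1 := by omega
    have h3 : (2 * (c &&& (c - 1))) / 2 = c &&& (c - 1) := by omega
    rw [h1, h2, h3, Nat.testBit_and]

theorem rowSpec_zero (i j : Int) : rowSpec i j 0 = [] := by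
  rw [rowSpec]
  simp

theorem rowSpec_pos (i j : Int) (a : Nat) (h : a ≠ 0) :
    rowSpec i j a = (if a % 2 = 1 then [[i, j]] else []) ++ rowSpec i (j + 1) (a / 2) := by
  rw [rowSpec]
  simp [h]

theorem pv_bitLength_double (x : Nat) (hx : 0 < x) :
    PySem.Int.bitLength ((2 * x : Nat) : Int) = PySem.Int.bitLength ((x : Nat) : Int) + 1 := by
  rw [PySem.Int.bitLength_of_pos (by exact_mod_cast (by omega : 0 < 2 * x))]
  congr 1
  rw [PySem.Int.floordiv_eq_ediv_of_pos (by norm_num)]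
  congr 1
  push_cast
  omega

theorem rowLoop_eq_rowSpec (i : Int) (a : Nat) : ∀ (j : Int),
    rowLoop i j (a : Int) = rowSpec i (j + 1) a := by
  induction a using Nat.strong_induction_on with
  | _ a IH =>
    intro j
    rcases Nat.eq_zero_or_pos a with rfl | ha
    · rw [rowLoop_nonpos _ _ _ (by simp), rowSpec_zero]
    have hpos : (0 : Int) < (a : Int) := by exact_mod_cast ha
    have hband := pv_band_neg_self (a : Int) hpos
    rw [Int.toNat_natCast] at hband
    rcases Nat.even_or_odd a with ⟨c, hc⟩ | ⟨c, hc⟩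
    · -- even: a = 2 * c, c > 0
      have hc' : a = 2 * c := by omega
      subst hc'
      have hcpos : 0 < c := by omega
      have hcast : (0 : Int) < (c : Int) := by exact_mod_cast hcpos
      obtain ⟨y, hy1, hy2⟩ : ∃ y, c &&& (c - 1) = y ∧ y ≤ c - 1 :=
        ⟨_, rfl, Nat.and_le_right⟩
      have hb2 : PySem.Int.band ((2 * c : Nat) : Int) (-((2 * c : Nat) : Int))
          = ((2 * (c - y) : Nat) : Int) := by
        rw [hband]
        congr 1
        calc 2 * c - (2 * c &&& (2 * c - 1)) = 2 * c - 2 * (c &&& (c - 1)) := by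
              rw [lowb_even]
          _ = 2 * (c - y) := by omega
      have hbc := pv_band_neg_self (c : Int) hcast
      rw [Int.toNat_natCast, hy1] at hbc
      have hxpos : 0 < c - y := by omega
      have hbl : PySem.Int.bitLength ((2 * (c - y) : Nat) : Int)
          = PySem.Int.bitLength (((c - y : Nat)) : Int) + 1 :=
        pv_bitLength_double (c - y) hxpos
      have hL : rowLoop i j ((2 * c : Nat) : Int) = rowLoop i (j + 1) (c : Int) := by
        rw [rowLoop_pos _ _ _ (by exact_mod_cast (by omega : 0 < 2 * c)),
            rowLoop_pos _ _ _ hcast, hb2, hbc, hbl]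
        have hsh : (((2 * c : Nat) : Int)) >>>
            (PySem.Int.bitLength (((c - y : Nat)) : Int) + 1)
            = ((c : Nat) : Int) >>> PySem.Int.bitLength (((c - y : Nat)) : Int) := by
          rw [← Int.natCast_shiftRight, ← Int.natCast_shiftRight]
          congr 1
          rw [Nat.shiftRight_eq_div_pow, Nat.shiftRight_eq_div_pow, pow_succ']
          exact Nat.mul_div_mul_left c (2 ^ _) (by norm_num)
        rw [hsh]
        have hj : j + ((PySem.Int.bitLength (((c - y : Nat)) : Int) + 1 : Nat) : Int)
            = (j + 1) + ((PySem.Int.bitLength (((c - y : Nat)) : Int) : Nat) : Int) := by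
          push_cast; ring
        rw [hj]
      rw [hL, IH c (by omega) (j + 1),
          rowSpec_pos i (j + 1) (2 * c) (by omega)]
      have hd : (2 * c) / 2 = c := by omega
      simp [hd]
    · -- odd: a = 2 * c + 1
      subst hc
      have hb2 : PySem.Int.band ((2 * c + 1 : Nat) : Int) (-((2 * c + 1 : Nat) : Int))
          = (1 : Int) := by
        rw [hband]
        have h1 : 2 * c + 1 - 1 = 2 * c := by omega
        rw [h1, lowb_odd]
        have h2 : 2 * c + 1 - 2 * c = 1 := by omega
        rw [h2]
        rfl
      have hbl : PySem.Int.bitLength (1 : Int) = 1 := by decide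
      rw [rowLoop_pos _ _ _ hpos, hb2, hbl]
      have hsh : (((2 * c + 1 : Nat) : Int)) >>> (1 : Nat) = ((c : Nat) : Int) := by
        rw [← Int.natCast_shiftRight]
        congr 1
        rw [Nat.shiftRight_eq_div_pow]
        omega
      rw [hsh]
      simp only [Nat.cast_one]
      rw [IH c (by omega) (j + 1), rowSpec_pos i (j + 1) (2 * c + 1) (by omega)]
      have hm : (2 * c + 1) % 2 = 1 := by omega
      have hd : (2 * c + 1) / 2 = c := by omega
      simp [hm, hd]

theorem pv_shiftRight_add (x : Int) (a b : Nat) :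
    x >>> (a + b) = (x >>> a) >>> b := by
  rw [Int.shiftRight_eq_div_pow, Int.shiftRight_eq_div_pow, Int.shiftRight_eq_div_pow]
  push_cast
  rw [pow_add]
  exact (Int.ediv_ediv_of_nonneg (by positivity)).symm

theorem innerA_fold (i number_of_nodes : Int) (m : Nat) :
    ∀ (j rest : Int) (res : List (List Int)), j + m = number_of_nodes + 1 →
    (PySem.List.pyRange j (number_of_nodes + 1) 1).foldl (fun st j' =>
        ((if PySem.Int.mod st.2 2 = 1 then st.1 ++ [[i, j']] else st.1),
          st.2 >>> (1 : Nat))) (res, rest)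
      = (res ++ rowA i j rest m, rest >>> m) := by
  induction m with
  | zero =>
    intro j rest res hj
    rw [PySem.List.pyRange_one_eq_nil (by exact_mod_cast (by omega : number_of_nodes + 1 ≤ j))]
    simp [rowA, Int.shiftRight_zero]
  | succ m IH =>
    intro j rest res hj
    have hlt : j < number_of_nodes + 1 := by
      have : (m : Int) ≥ 0 := by positivity
      push_cast at hj
      omega
    rw [PySem.List.pyRange_one_cons hlt]
    simp only [List.foldl_cons]
    rw [IH (j + 1) (rest >>> (1 : Nat))
        ((if PySem.Int.mod rest 2 = 1 then res ++ [[i, j]] else res))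
        (by push_cast at hj ⊢; omega)]
    have hsh : (rest >>> (1 : Nat)) >>> m = rest >>> (m + 1) := by
      rw [← pv_shiftRight_add]
      congr 1
      omega
    rw [hsh]
    show ((if PySem.Int.mod rest 2 = 1 then res ++ [[i, j]] else res) ++
        rowA i (j + 1) (rest >>> (1 : Nat)) m, rest >>> (m + 1))
      = (res ++ rowA i j rest (m + 1), rest >>> (m + 1))
    have hm2 : PySem.Int.mod rest 2 = rest % 2 := PySem.Int.mod_eq_emod_of_pos (by norm_num)
    rw [rowA, hm2]
    by_cases hmod : rest % 2 = 1 <;> simp [hmod]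

theorem rowA_eq_rowSpec (i : Int) (m : Nat) : ∀ (j rest : Int),
    rowA i j rest m = rowSpec i j ((PySem.Int.mod rest (2 ^ m)).toNat) := by
  induction m with
  | zero =>
    intro j rest
    have h1 : PySem.Int.mod rest (2 ^ 0) = 0 := by
      rw [PySem.Int.mod_eq_emod_of_pos (by norm_num)]
      simp
    rw [h1]
    simp [rowA, rowSpec_zero]
  | succ m IH =>
    intro j rest
    have hM : (0 : Int) < 2 ^ (m + 1) := by positivity
    have hMm : (0 : Int) < 2 ^ m := by positivity
    have hmod1 : PySem.Int.mod rest (2 ^ (m + 1)) = rest % 2 ^ (m + 1) :=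
      PySem.Int.mod_eq_emod_of_pos hM
    have hmod2 : PySem.Int.mod (rest >>> (1 : Nat)) (2 ^ m) = (rest >>> (1 : Nat)) % 2 ^ m :=
      PySem.Int.mod_eq_emod_of_pos hMm
    have hsh1 : rest >>> (1 : Nat) = rest / 2 := by
      rw [Int.shiftRight_eq_div_pow]; norm_num
    have K1 : rest % 2 ^ (m + 1) % 2 = rest % 2 := by
      exact Int.emod_emod_of_dvd rest ⟨2 ^ m, by ring⟩
    have hdd : rest / 2 / 2 ^ m = rest / 2 ^ (m + 1) := by
      rw [Int.ediv_ediv_of_nonneg (by norm_num)]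
      congr 1
      ring
    have K2 : rest % 2 ^ (m + 1) / 2 = (rest / 2) % 2 ^ m := by
      calc rest % 2 ^ (m + 1) / 2
          = (rest + 2 * (-(2 ^ m * (rest / 2 / 2 ^ m)))) / 2 := by
            rw [Int.emod_def, hdd]
            congr 1
            ring
        _ = rest / 2 + (-(2 ^ m * (rest / 2 / 2 ^ m))) :=
            Int.add_mul_ediv_left _ _ (by norm_num)
        _ = (rest / 2) % 2 ^ m := by
            rw [Int.emod_def]
            ring
    have hnn : 0 ≤ rest % 2 ^ (m + 1) := Int.emod_nonneg rest (by positivity)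
    have hcast : ((rest % 2 ^ (m + 1)).toNat : Int) = rest % 2 ^ (m + 1) :=
      Int.toNat_of_nonneg hnn
    set a := (rest % 2 ^ (m + 1)).toNat with hadef
    have hm2 : PySem.Int.mod rest 2 = rest % 2 := PySem.Int.mod_eq_emod_of_pos (by norm_num)
    have hia : a % 2 = 1 ↔ rest % 2 = 1 := by
      rw [← K1]
      constructor
      · intro h
        have h' : ((a % 2 : Nat) : Int) = 1 := by exact_mod_cast h
        rw [Int.natCast_emod, hcast] at h'
        exact_mod_cast h'
      · intro h
        have h' : ((a % 2 : Nat) : Int) = 1 := by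
          rw [Int.natCast_emod, hcast]; exact_mod_cast h
        exact_mod_cast h'
    have hib : (a / 2 : Nat) = (PySem.Int.mod (rest >>> (1 : Nat)) (2 ^ m)).toNat := by
      have h' : ((a / 2 : Nat) : Int) = (rest / 2) % 2 ^ m := by
        rw [Int.natCast_ediv, hcast]
        push_cast
        rw [K2]
      rw [hmod2, hsh1]
      omega
    rw [hmod1, ← hadef, rowA, IH (j + 1) (rest >>> (1 : Nat)), ← hib, hm2]
    by_cases ha0 : a = 0
    · have hz : ¬ (rest % 2 = 1) := by
        intro hc
        have := hia.2 hc
        omega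
      have hz2 : a / 2 = 0 := by omega
      rw [hz2, ha0, rowSpec_zero, rowSpec_zero, if_neg hz]
      simp
    · rw [rowSpec_pos i j a ha0]
      by_cases hb : rest % 2 = 1
      · rw [if_pos hb, if_pos (hia.2 hb)]
      · rw [if_neg hb, if_neg (fun hc => hb (hia.1 hc))]

theorem band_mask (r : Int) (m : Nat) :
    PySem.Int.band r (((1 : Int) <<< m) - 1) = PySem.Int.mod r (2 ^ m) := by
  have hmask : ((1 : Int) <<< m) - 1 = 2 ^ m - 1 := by simp [Int.shiftLeft_eq]
  have hM : (0 : Int) < 2 ^ m := by positivity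
  have hcast : ((2 ^ m - 1 : Int)).toNat = 2 ^ m - 1 := by
    have : ((2 ^ m : Nat) : Int) = 2 ^ m := by push_cast; ring
    omega
  rw [hmask, PySem.Int.mod_eq_emod_of_pos hM]
  unfold PySem.Int.band
  by_cases hr : 0 ≤ r
  · rw [if_pos hr, if_pos (by omega)]
    rw [hcast, Nat.and_two_pow_sub_one_eq_mod, Int.natCast_emod, Int.toNat_of_nonneg hr]
    push_cast
    ring
  · rw [if_neg hr, if_pos (by omega)]
    rw [hcast, Nat.land_comm, Nat.and_two_pow_sub_one_eq_mod]
    have hs : ((-r - 1).toNat : Int) = -r - 1 := by omega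
    set s := (-r - 1).toNat with hsdef
    have hr' : r = -((s : Int) + 1) := by omega
    have hsm : ((s % 2 ^ m : Nat) : Int) = (s : Int) % 2 ^ m := by
      rw [Int.natCast_emod]
      push_cast
      ring
    have hbound1 : 0 ≤ (s : Int) % 2 ^ m := Int.emod_nonneg _ (by positivity)
    have hbound2 : (s : Int) % 2 ^ m < 2 ^ m := Int.emod_lt_of_pos _ hM
    have hgoal : r % 2 ^ m = 2 ^ m - 1 - (s : Int) % 2 ^ m := by
      have hzero : (r - (2 ^ m - 1 - (s : Int) % 2 ^ m)) % 2 ^ m = 0 := by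
        have he : r - (2 ^ m - 1 - (s : Int) % 2 ^ m)
            = 2 ^ m * (-((s : Int) / 2 ^ m) - 1) := by
          rw [hr']
          rw [Int.emod_def]
          ring
        rw [he]
        exact Int.mul_emod_right _ _
      have := Int.emod_eq_emod_iff_emod_sub_eq_zero.mpr hzero
      rw [this, Int.emod_eq_of_lt (by omega) (by omega)]
    rw [hgoal]
    have hle : s % 2 ^ m ≤ 2 ^ m - 1 := by
      have := Nat.mod_lt s (y := 2 ^ m) (by positivity)
      omega
    omega

-- shifting out a bits of a multiple of 2^(a+b) leaves a multiple of 2^b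
theorem shift_mod_zero (r : Int) (a b : Nat) (h : r % 2 ^ (a + b) = 0) :
    (r >>> a) % 2 ^ b = 0 := by
  obtain ⟨q, hq⟩ : (2 : Int) ^ (a + b) ∣ r := Int.dvd_of_emod_eq_zero h
  rw [Int.shiftRight_eq_div_pow, hq, pow_add]
  push_cast
  rw [mul_assoc, Int.mul_ediv_cancel_left _ (by positivity)]
  exact Int.mul_emod_right _ _

-- the residue mod 2^(a+b), shifted right by a, is the shifted value's residue mod 2^b
theorem mod_pow_shift (r : Int) (a b : Nat) :
    (r % 2 ^ (a + b)) >>> a = (r >>> a) % 2 ^ b := by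
  rw [Int.shiftRight_eq_div_pow, Int.shiftRight_eq_div_pow]
  push_cast
  have hdd : r / 2 ^ a / 2 ^ b = r / 2 ^ (a + b) := by
    rw [Int.ediv_ediv_of_nonneg (by positivity)]
    congr 1
    rw [pow_add]
  calc r % 2 ^ (a + b) / 2 ^ a
      = (r + 2 ^ a * (-(2 ^ b * (r / 2 ^ a / 2 ^ b)))) / 2 ^ a := by
        rw [Int.emod_def, hdd]
        congr 1
        rw [pow_add]
        ring
    _ = r / 2 ^ a + (-(2 ^ b * (r / 2 ^ a / 2 ^ b))) :=
        Int.add_mul_ediv_left _ _ (by positivity)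
    _ = (r / 2 ^ a) % 2 ^ b := by
        rw [Int.emod_def]
        ring

theorem mod_mod_pow (r : Int) (a b : Nat) (h : a ≤ b) :
    (r % 2 ^ b) % 2 ^ a = r % 2 ^ a :=
  Int.emod_emod_of_dvd r (pow_dvd_pow 2 h)

theorem triangle_step (c : Nat) : (c + 1) * c / 2 = c + c * (c - 1) / 2 := by
  rcases c with _ | k
  · rfl
  · have h1 : (k + 1 + 1) * (k + 1) = (k + 1) * ((k + 1) - 1) + 2 * (k + 1) := by
      simp
      ring
    rw [h1, Nat.add_mul_div_left _ _ (by norm_num : 0 < 2)]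
    omega

-- if all the bits A will still read are zero, A appends nothing more
theorem aFold_zero (n ev : Int) (cnt : Nat) : ∀ (i off : Int) (res : List (List Int)),
    0 ≤ off → i + cnt = n + 1 →
    (ev >>> off.toNat) % 2 ^ (cnt * (cnt - 1) / 2) = 0 →
    ((PySem.List.pyRange i (n + 1) 1).foldl (fun st i' =>
        (PySem.List.pyRange (i' + 1) (n + 1) 1).foldl (fun st j =>
          ((if PySem.Int.mod st.2 2 = 1 then st.1 ++ [[i', j]] else st.1),
            st.2 >>> (1 : Nat))) st)
        (res, ev >>> off.toNat)).1 = res := by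
  induction cnt with
  | zero =>
    intro i off res hoff hi _
    rw [PySem.List.pyRange_one_eq_nil (by push_cast at hi; omega)]
    rfl
  | succ cnt IH =>
    intro i off res hoff hi hz
    have hlt : i < n + 1 := by push_cast at hi; omega
    rw [PySem.List.pyRange_one_cons hlt]
    simp only [List.foldl_cons]
    rw [innerA_fold i n cnt (i + 1) (ev >>> off.toNat) res (by push_cast at hi ⊢; omega)]
    have hE : (cnt + 1) * ((cnt + 1) - 1) / 2 = cnt + cnt * (cnt - 1) / 2 := by
      simpa using triangle_step cnt
    rw [hE] at hz
    have hrow0 : (ev >>> off.toNat) % 2 ^ cnt = 0 := by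
      rw [← mod_mod_pow (ev >>> off.toNat) cnt (cnt + cnt * (cnt - 1) / 2) (by omega), hz]
      simp
    have hrow : rowA i (i + 1) (ev >>> off.toNat) cnt = [] := by
      rw [rowA_eq_rowSpec, PySem.Int.mod_eq_emod_of_pos (by positivity), hrow0]
      simpa using rowSpec_zero i (i + 1)
    rw [hrow, List.append_nil]
    have hsh : (ev >>> off.toNat) >>> cnt = ev >>> (off + (cnt : Int)).toNat := by
      rw [← pv_shiftRight_add]
      congr 1
      omega
    rw [hsh]
    exact IH (i + 1) (off + (cnt : Int)) res (by omega) (by push_cast at hi ⊢; omega)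
      (by rw [← hsh]; exact shift_mod_zero _ _ _ hz)

-- the main correspondence: A's remaining fold equals B's remaining loop on the
-- masked remaining bits
theorem outer_eq (n ev : Int) (cnt : Nat) : ∀ (i off : Int) (res : List (List Int)),
    0 ≤ off → i + cnt = n + 1 →
    ((PySem.List.pyRange i (n + 1) 1).foldl (fun st i' =>
        (PySem.List.pyRange (i' + 1) (n + 1) 1).foldl (fun st j =>
          ((if PySem.Int.mod st.2 2 = 1 then st.1 ++ [[i', j]] else st.1),
            st.2 >>> (1 : Nat))) st)
        (res, ev >>> off.toNat)).1
      = bLoop n (PySem.List.pyRange i n 1)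
          (res, (ev >>> off.toNat) % 2 ^ (cnt * (cnt - 1) / 2)) := by
  induction cnt with
  | zero =>
    intro i off res hoff hi
    rw [PySem.List.pyRange_one_eq_nil (show n + 1 ≤ i by push_cast at hi; omega),
        PySem.List.pyRange_one_eq_nil (show n ≤ i by push_cast at hi; omega)]
    rfl
  | succ cnt IH =>
    intro i off res hoff hi
    set rest := ev >>> off.toNat with hrest
    have hE : (cnt + 1) * ((cnt + 1) - 1) / 2 = cnt + cnt * (cnt - 1) / 2 := by
      simpa using triangle_step cnt
    rcases Nat.eq_zero_or_pos cnt with rfl | hcnt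
    · -- last row i = n: A reads no bits, B's range is already empty
      have hin : i = n := by push_cast at hi; omega
      rw [PySem.List.pyRange_one_cons (show i < n + 1 by omega)]
      simp only [List.foldl_cons]
      rw [PySem.List.pyRange_one_eq_nil (show n + 1 ≤ i + 1 by omega),
          PySem.List.pyRange_one_eq_nil (show n ≤ i by omega)]
      simp only [List.foldl_nil]
      rfl
    · have hlti : i < n := by push_cast at hi; omega
      have hm : (n - i).toNat = cnt := by push_cast at hi; omega
      rw [PySem.List.pyRange_one_cons (by omega : i < n + 1),
          PySem.List.pyRange_one_cons hlti]
      simp only [List.foldl_cons]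
      rw [innerA_fold i n cnt (i + 1) rest res (by push_cast at hi ⊢; omega)]
      show _ = bLoop n (i :: PySem.List.pyRange (i + 1) n 1)
          (res, rest % 2 ^ ((cnt + 1) * ((cnt + 1) - 1) / 2))
      rw [bLoop]
      set T := cnt * (cnt - 1) / 2 with hT
      have hEx : (cnt + 1) * ((cnt + 1) - 1) / 2 = cnt + T := hE
      by_cases hW : rest % 2 ^ ((cnt + 1) * ((cnt + 1) - 1) / 2) = 0
      · rw [if_pos hW]
        have hz : rest % 2 ^ (cnt + T) = 0 := by rw [← hEx]; exact hW
        have hrow0 : rest % 2 ^ cnt = 0 := by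
          rw [← mod_mod_pow rest cnt (cnt + T) (by omega), hz]
          simp
        have hrow : rowA i (i + 1) rest cnt = [] := by
          rw [rowA_eq_rowSpec, PySem.Int.mod_eq_emod_of_pos (by positivity), hrow0]
          simpa using rowSpec_zero i (i + 1)
        rw [hrow, List.append_nil]
        have hsh : rest >>> cnt = ev >>> (off + (cnt : Int)).toNat := by
          rw [hrest, ← pv_shiftRight_add]
          congr 1
          omega
        rw [hsh]
        exact aFold_zero n ev cnt (i + 1) (off + (cnt : Int)) res (by omega)
          (by push_cast at hi ⊢; omega)
          (by rw [← hsh]; exact shift_mod_zero _ _ _ hz)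
      · rw [if_neg hW]
        -- the chunk B extracts is exactly the row A reads
        have hchunk : PySem.Int.band (rest % 2 ^ ((cnt + 1) * ((cnt + 1) - 1) / 2))
            (((1 : Int) <<< (n - i).toNat) - 1) = PySem.Int.mod rest (2 ^ cnt) := by
          rw [hm, band_mask, PySem.Int.mod_eq_emod_of_pos (by positivity),
              PySem.Int.mod_eq_emod_of_pos (by positivity), hEx]
          exact mod_mod_pow rest cnt (cnt + T) (by omega)
        have hnn : 0 ≤ PySem.Int.mod rest (2 ^ cnt) :=
          PySem.Int.mod_nonneg _ (by positivity)
        have hcast : PySem.Int.mod rest (2 ^ cnt)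
            = (((PySem.Int.mod rest (2 ^ cnt)).toNat : Nat) : Int) := by omega
        have hrowB : rowLoop i i (PySem.Int.mod rest (2 ^ cnt))
            = rowA i (i + 1) rest cnt := by
          rw [hcast, rowLoop_eq_rowSpec i _ i, ← rowA_eq_rowSpec i cnt (i + 1) rest]
        have hsh2 : (rest % 2 ^ ((cnt + 1) * ((cnt + 1) - 1) / 2)) >>> (n - i).toNat
            = (ev >>> (off + (cnt : Int)).toNat) % 2 ^ T := by
          rw [hm, hEx, mod_pow_shift rest cnt T, hrest, ← pv_shiftRight_add]
          congr 2
          omega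
        rw [hchunk, hrowB, hsh2]
        have hshA : rest >>> cnt = ev >>> (off + (cnt : Int)).toNat := by
          rw [hrest, ← pv_shiftRight_add]
          congr 1
          omega
        rw [hshA]
        exact IH (i + 1) (off + (cnt : Int)) (res ++ rowA i (i + 1) rest cnt)
          (by omega) (by push_cast at hi ⊢; omega)

-- for 0 ≤ n, the exact integer length matches the Nat triangular count
theorem evl_toNat (n : Int) (hn : 0 ≤ n) :
    (edge_vector_length n).toNat = n.toNat * (n.toNat - 1) / 2 := by
  unfold edge_vector_length
  obtain ⟨k, rfl⟩ : ∃ k : Nat, n = (k : Int) := ⟨n.toNat, by omega⟩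
  rcases k with _ | m
  · decide
  · have h1 : ((m + 1 : Nat) : Int) * (((m + 1 : Nat) : Int) - 1)
        = (((m + 1) * m : Nat) : Int) := by push_cast; ring
    rw [h1, show ((2 : Int)) = ((2 : Nat) : Int) by norm_num, ← Int.natCast_div,
        Int.toNat_natCast, Int.toNat_natCast]
    simp

theorem create_instance_spec : Claim_equal_create_instance := by
  intro n ev hdom hpre
  unfold Spec_create_instance create_instance create_instance_alt
  have hL0 : 0 ≤ edge_vector_length n := by
    unfold edge_vector_length
    apply Int.ediv_nonneg _ (by norm_num)
    rcases (by omega : n ≤ 0 ∨ 0 < n) with h | h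
    · have h2 : 0 ≤ (-n) * (1 - n) := mul_nonneg (by omega) (by omega)
      nlinarith [h2]
    · exact mul_nonneg (by omega) (by omega)
  have hfd : PySem.Int.floordiv (n * (n - 1)) 2 = edge_vector_length n :=
    PySem.Int.floordiv_eq_ediv_of_pos (by norm_num)
  have hshl : ((1 : Int) <<< (edge_vector_length n).toNat) - 1
      = 2 ^ (edge_vector_length n).toNat - 1 := by
    rw [Int.shiftLeft_eq]
    ring_nf
  have hAguard : ¬ (2 ^ (edge_vector_length n).toNat - 1 < ev) := by
    rcases hpre with h | h
    · have : (0:Int) < 2 ^ (edge_vector_length n).toNat := by positivity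
      omega
    · have h1 := PySem.Int.lt_two_pow_bitLength ev
      have h2 : (2:Nat) ^ PySem.Int.bitLength ev ≤ 2 ^ (edge_vector_length n).toNat := by
        apply Nat.pow_le_pow_right (by norm_num)
        omega
      have h3 : ev ≤ (ev.natAbs : Int) := Int.le_natAbs
      have h4 : (ev.natAbs : Int) < ((2 ^ (edge_vector_length n).toNat : Nat) : Int) := by
        exact_mod_cast lt_of_lt_of_le h1 h2
      have h5 : ((2 ^ (edge_vector_length n).toNat : Nat) : Int)
          = 2 ^ (edge_vector_length n).toNat := by push_cast; ring
      omega
  simp only [hfd, hshl]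
  rw [if_neg hAguard, if_neg hAguard]
  rcases (by omega : 0 ≤ n ∨ n < 0) with hn | hn
  · have hmain := outer_eq n ev n.toNat 1 0 [] le_rfl (by omega)
    rw [show ((0 : Int).toNat) = 0 from rfl, Int.shiftRight_zero] at hmain
    rw [hmain, ← hshl, band_mask, PySem.Int.mod_eq_emod_of_pos (by positivity),
        evl_toNat n hn]
  · rw [PySem.List.pyRange_one_eq_nil (by omega : n + 1 ≤ 1),
        PySem.List.pyRange_one_eq_nil (by omega : n ≤ 1)]
    rfl
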